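-- pv_equiv track=rewrite | github.com/pendrixfan01/TfL-NEA | src/tflApp/__main__.py | reasonTrimmer
-- ===== SOURCE A (Python) =====
-- def reasonTrimmer(reason):
--     charCount = 0
--     for character in reason:
--         if character != ':':
--             reason = reason[:charCount] + reason[charCount+1:]
--         else:
--             reason = reason.replace(':','')
--             reason = reason.strip()
--             return reason
-- ===== SOURCE B (Python) =====
-- def reasonTrimmer(reason):
--     # Single forward pass: flag-gated accumulator instead of slicing/early return.
--     seen_colon = False
--     acc = []
--     for c in reason:
--         if not seen_colon:
--             if c == ':':
--                 seen_colon = True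
--         else:
--             if c != ':':
--                 acc.append(c)
--     if not seen_colon:
--         return None
--     return ''.join(acc).strip()
-- ===== Notes on version B (the rewrite author's own statement) =====
-- stated objective: faster
-- what changed: Replaced A's per-character front-slicing of the string plus replace()-and-early-return with a single forward pass using a seen-colon flag and a character accumulator.
import Mathlib
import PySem

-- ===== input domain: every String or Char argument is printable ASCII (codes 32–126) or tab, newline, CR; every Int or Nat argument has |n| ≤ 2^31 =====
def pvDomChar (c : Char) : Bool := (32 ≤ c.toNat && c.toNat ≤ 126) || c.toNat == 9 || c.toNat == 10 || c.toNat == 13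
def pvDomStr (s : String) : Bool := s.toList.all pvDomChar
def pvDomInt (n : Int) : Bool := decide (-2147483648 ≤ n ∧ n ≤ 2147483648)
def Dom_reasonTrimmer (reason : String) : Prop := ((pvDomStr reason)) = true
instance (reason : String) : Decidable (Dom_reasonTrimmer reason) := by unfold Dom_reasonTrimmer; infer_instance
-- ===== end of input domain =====

-- B replaces A's per-character front-slicing and replace()-and-early-return with a single
-- flag-gated O(n) accumulator pass, avoiding A's quadratic per-character front-slicing.

-- ===== PORT A =====
-- the for-loop of A: iterates over the ORIGINAL characters (cs), with mutable state
-- charCount (never incremented by A) and reason (r); early return on the first ':'.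
def pvALoop (cs : List Char) (charCount : Int) (r : List Char) : Option (List Char) :=
  match cs with
  | [] => none
  | c :: rest =>
    if c ≠ ':' then
      pvALoop rest charCount
        (PySem.List.slice r none (some charCount) ++ PySem.List.slice r (some (charCount + 1)) none)
    else
      some (PySem.Chars.strip (PySem.Chars.replace r [':'] []))

def reasonTrimmer (reason : String) : Option String :=
  (pvALoop reason.toList 0 reason.toList).map String.ofList

-- ===== PORT B =====
-- B's loop: seen-colon flag and accumulator; strip the joined accumulator at the end.
def pvBLoop (cs : List Char) (seen : Bool) (acc : List Char) : Option (List Char) :=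
  match cs with
  | [] => if seen then some (PySem.Chars.strip acc) else none
  | c :: rest =>
    if !seen then
      if c = ':' then pvBLoop rest true acc else pvBLoop rest seen acc
    else
      if c ≠ ':' then pvBLoop rest seen (acc ++ [c]) else pvBLoop rest seen acc

def reasonTrimmer_alt (reason : String) : Option String :=
  (pvBLoop reason.toList false []).map String.ofList

-- ===== PRECONDITION & SPEC =====
def Spec_reasonTrimmer (reason : String) (out : Option String) : Prop := out = reasonTrimmer_alt reason
instance (reason : String) (out : Option String) : Decidable (Spec_reasonTrimmer reason out) := by unfold Spec_reasonTrimmer; infer_instance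

-- ===== CLAIM (what is proved, stated in full; the proofs are below) =====
def Claim_equal_reasonTrimmer : Prop := ∀ (reason : String), Dom_reasonTrimmer reason → Spec_reasonTrimmer reason (reasonTrimmer reason)

-- ===== LEMMAS AND PROOFS =====

-- replace(r, ':', '') removes exactly the colon characters
lemma replace_colon_go (fuel : Nat) : ∀ (l acc : List Char), l.length ≤ fuel →
    PySem.Chars.replace.go [':'] [] fuel l acc = acc.reverse ++ l.filter (fun c => c ≠ ':') := by
  induction fuel with
  | zero =>
    intro l acc h
    have : l = [] := List.eq_nil_of_length_eq_zero (Nat.le_zero.mp h)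
    subst this; simp [PySem.Chars.replace.go]
  | succ n ih =>
    intro l acc h
    cases l with
    | nil => simp [PySem.Chars.replace.go]
    | cons c t =>
      simp only [PySem.Chars.replace.go]
      by_cases hc : c = ':'
      · subst hc
        have hp : [':'].isPrefixOf (':' :: t) = true := by simp [List.isPrefixOf]
        rw [if_pos hp]
        simp only [List.length, List.drop_succ_cons, List.drop_zero, List.reverse_nil,
          List.nil_append]
        rw [ih t acc (by simpa using Nat.le_of_succ_le_succ h)]
        simp
      · have hp : [':'].isPrefixOf (c :: t) = false := by
          simp [List.isPrefixOf]; exact fun h => hc h.symm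
        rw [if_neg (by simp [hp])]
        rw [ih t (c :: acc) (by simpa using Nat.le_of_succ_le_succ h)]
        simp [hc]

lemma replace_colon (r : List Char) :
    PySem.Chars.replace r [':'] [] = r.filter (fun c => c ≠ ':') := by
  simp only [PySem.Chars.replace, List.isEmpty_cons, Bool.false_eq_true, if_false]
  exact replace_colon_go r.length r [] le_rfl

-- once the flag is set, B accumulates the non-colon characters and strips at the end
lemma pvBLoop_true (cs : List Char) : ∀ (acc : List Char),
    pvBLoop cs true acc = some (PySem.Chars.strip (acc ++ cs.filter (fun c => c ≠ ':'))) := by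
  induction cs with
  | nil => intro acc; simp [pvBLoop]
  | cons c t ih =>
    intro acc
    by_cases hc : c = ':'
    · subst hc; simp [pvBLoop, ih]
    · simp [pvBLoop, hc, ih]

-- the loop invariant of A: before the first colon, the shrinking 'reason' equals the
-- remaining characters, so A at the first colon holds exactly the suffix from that colon
lemma pvALoop_eq_pvBLoop (cs : List Char) : pvALoop cs 0 cs = pvBLoop cs false [] := by
  induction cs with
  | nil => rfl
  | cons c t ih =>
    by_cases hc : c = ':'
    · subst hc
      simp only [pvALoop, pvBLoop, ne_eq, not_true_eq_false, if_false, Bool.not_false,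
        if_true]
      rw [pvBLoop_true, replace_colon]
      simp
    · simp only [pvALoop, pvBLoop, ne_eq, hc, not_false_eq_true, if_true, Bool.not_false]
      simp only [zero_add, Std.le_refl, zero_le_one, PySem.List.slice_to,
        PySem.List.slice_from, Int.toNat_zero, Int.toNat_one, List.take_zero, List.drop_one,
        List.nil_append, List.tail_cons, if_false]
      exact ih

-- ===== VERDICT (by name: the statement is the Claim_ definition above) =====
theorem reasonTrimmer_spec : Claim_equal_reasonTrimmer := by
  intro reason _
  show reasonTrimmer reason = reasonTrimmer_alt reason
  unfold reasonTrimmer reasonTrimmer_alt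
  rw [pvALoop_eq_pvBLoop]
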